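-- pv_equiv track=rewrite | github.com/Sulliwen/Master | Projet_CB/src/Calcul_bornes.py | calcul_borne_inf_th
-- ===== SOURCE A (Python) =====
-- import math
--
-- def calcul_borne_inf_th(A, n):
--     # Pour l'instant borne inf = ceil(deg_max/2) (Yixun Lin 1995..)
--     deg_max = 0
--     for i in range(1,n+1):
--         cpt = 0
--         for edge in A:
--             if edge[0] == i or edge[1] == i:
--                 cpt += 1
--         if cpt > deg_max:
--             deg_max = cpt
--     return math.ceil(deg_max/2)
-- ===== SOURCE B (Python) =====
-- def calcul_borne_inf_th(A, n):
--     # One pass over the edges builds a degree table (a self-loop counts once),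
--     # then one pass over the vertices takes the max; ceil(d/2) == (d+1)//2 for d >= 0.
--     deg = {}
--     for e in A:
--         for v in ((e[0],) if e[0] == e[1] else (e[0], e[1])):
--             deg[v] = deg.get(v, 0) + 1
--     deg_max = 0
--     for i in range(1, n + 1):
--         d = deg.get(i, 0)
--         if d > deg_max:
--             deg_max = d
--     return (deg_max + 1) // 2
-- ===== Notes on version B (the rewrite author's own statement) =====
-- stated objective: faster
-- what changed: Replaces the nested vertex-by-edge scan (for each i in 1..n rescan all edges) with a single pass over the edges building a degree dictionary, followed by one max pass over the vertices.
import Mathlib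
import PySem

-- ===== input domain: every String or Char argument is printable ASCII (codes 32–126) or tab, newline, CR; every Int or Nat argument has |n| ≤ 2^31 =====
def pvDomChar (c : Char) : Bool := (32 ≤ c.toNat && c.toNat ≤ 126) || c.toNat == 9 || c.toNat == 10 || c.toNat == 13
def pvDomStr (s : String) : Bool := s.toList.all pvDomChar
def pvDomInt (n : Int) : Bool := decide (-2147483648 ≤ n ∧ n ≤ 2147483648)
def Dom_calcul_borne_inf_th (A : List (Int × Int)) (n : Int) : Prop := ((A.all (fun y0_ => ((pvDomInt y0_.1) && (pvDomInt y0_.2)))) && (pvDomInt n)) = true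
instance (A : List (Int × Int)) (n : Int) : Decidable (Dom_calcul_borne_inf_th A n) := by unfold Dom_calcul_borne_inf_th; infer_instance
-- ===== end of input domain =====

-- B replaces A's nested vertex×edge rescans by one degree-table pass over the edges
-- plus one max pass over the vertices (objective: faster).

-- ===== PORT A =====
def calcul_borne_inf_th (A : List (Int × Int)) (n : Int) : Int :=
  let deg_max : Int :=
    (PySem.List.pyRange 1 (n + 1) 1).foldl
      (fun deg_max i =>
        let cpt : Int :=
          A.foldl (fun cpt edge => if edge.1 = i ∨ edge.2 = i then cpt + 1 else cpt) 0
        if cpt > deg_max then cpt else deg_max) 0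
  -- math.ceil(deg_max/2): exact as (deg_max+1)//2 since deg_max is a nonnegative count
  PySem.Int.floordiv (deg_max + 1) 2

-- ===== PORT B =====
def calcul_borne_inf_th_alt (A : List (Int × Int)) (n : Int) : Int :=
  let deg : PySem.Dict Int Int :=
    A.foldl
      (fun d e =>
        (if e.1 = e.2 then [e.1] else [e.1, e.2]).foldl
          (fun d v => d.insert v (d.getD v 0 + 1)) d)
      PySem.Dict.empty
  let deg_max : Int :=
    (PySem.List.pyRange 1 (n + 1) 1).foldl
      (fun deg_max i =>
        let d := deg.getD i 0
        if d > deg_max then d else deg_max) 0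
  PySem.Int.floordiv (deg_max + 1) 2

-- ===== PRECONDITION & SPEC =====
def Spec_calcul_borne_inf_th (A : List (Int × Int)) (n : Int) (out : Int) : Prop := out = calcul_borne_inf_th_alt A n
instance (A : List (Int × Int)) (n : Int) (out : Int) : Decidable (Spec_calcul_borne_inf_th A n out) := by unfold Spec_calcul_borne_inf_th; infer_instance

-- ===== CLAIM (what is proved, stated in full; the proofs are below) =====
def Claim_equal_calcul_borne_inf_th : Prop := ∀ (A : List (Int × Int)) (n : Int), Dom_calcul_borne_inf_th A n → Spec_calcul_borne_inf_th A n (calcul_borne_inf_th A n)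

-- ===== LEMMAS AND PROOFS =====

-- the multiset of endpoints an edge contributes (a self-loop contributes once)
def pvEnds (e : Int × Int) : List Int := if e.1 = e.2 then [e.1] else [e.1, e.2]

theorem pv_foldl_flatMap {α β γ : Type} (f : α → List β) (g : γ → β → γ) :
    ∀ (l : List α) (init : γ),
      (l.flatMap f).foldl g init = l.foldl (fun acc x => (f x).foldl g acc) init := by
  intro l
  induction l with
  | nil => intro init; simp
  | cons a t ih => intro init; simp [List.flatMap_cons, List.foldl_append, ih]

theorem pv_count_ends (i : Int) :
    ∀ (A : List (Int × Int)),
      ((A.flatMap pvEnds).count i : Int)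
        = A.foldl (fun cpt e => if e.1 = i ∨ e.2 = i then cpt + 1 else cpt) 0 := by
  intro A
  rw [PySem.List.foldl_ite_add_one (fun e => e.1 = i ∨ e.2 = i) A 0]
  induction A with
  | nil => simp
  | cons e t ih =>
    simp only [List.flatMap_cons, List.count_append, List.countP_cons]
    push_cast
    have h : ((pvEnds e).count i : Int)
        = (if decide (e.1 = i ∨ e.2 = i) = true then 1 else 0) := by
      unfold pvEnds
      by_cases h12 : e.1 = e.2 <;> by_cases h1 : e.1 = i <;> by_cases h2 : e.2 = i <;>
        simp_all
    rw [h]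
    push_cast at ih
    omega

theorem pv_getD_build (i : Int) (A : List (Int × Int)) :
    ((A.foldl
        (fun d e => (pvEnds e).foldl (fun d v => d.insert v (d.getD v 0 + 1)) d)
        (PySem.Dict.empty : PySem.Dict Int Int)).getD i 0)
      = ((A.flatMap pvEnds).count i : Int) := by
  have h := pv_foldl_flatMap pvEnds (fun d v => d.insert v (d.getD v 0 + 1)) A
    (PySem.Dict.empty : PySem.Dict Int Int)
  rw [← h, PySem.Dict.getD_foldl_insert_add_one]
  simp [PySem.Dict.getD_empty]

-- ===== VERDICT (by name: the statement is the Claim_ definition above) =====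
theorem calcul_borne_inf_th_spec : Claim_equal_calcul_borne_inf_th := by
  intro A n _
  unfold Spec_calcul_borne_inf_th calcul_borne_inf_th calcul_borne_inf_th_alt
  refine congrArg (fun z : Int => PySem.Int.floordiv (z + 1) 2) ?_
  apply PySem.List.foldl_congr_mem
  intro acc i _
  have h := pv_getD_build i A
  rw [pv_count_ends i A] at h
  simp only [pvEnds] at h
  rw [h]
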